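-- pv_equiv track=rewrite | github.com/fernandoaafonseca/daily-coding | books/book-01-a-practical-introduction-to-python-programming/ch_05_misc_topics_i-062_sum_with_alternating_signs.py | calculate_sum_alternating_signs
-- ===== SOURCE A (Python) =====
-- def calculate_sum_alternating_signs(higher_bound: int) -> int:
-- 	total_sum = 0
-- 	for i in range (1, higher_bound + 1):
-- 		if i % 2 == 0:
-- 			total_sum -= i
-- 		else:
-- 			total_sum += i
--
-- 	return total_sum
-- ===== SOURCE B (Python) =====
-- def calculate_sum_alternating_signs(higher_bound: int) -> int:
--     if higher_bound <= 0:
--         return 0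
--     if higher_bound % 2 == 0:
--         return -(higher_bound // 2)
--     return (higher_bound + 1) // 2
-- ===== Notes on version B (the rewrite author's own statement) =====
-- stated objective: faster
-- what changed: Replaced the O(n) loop over range(1, n+1) with the closed form of the alternating sum: -(n//2) for even n, (n+1)//2 for odd n, 0 for n <= 0.
import Mathlib
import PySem

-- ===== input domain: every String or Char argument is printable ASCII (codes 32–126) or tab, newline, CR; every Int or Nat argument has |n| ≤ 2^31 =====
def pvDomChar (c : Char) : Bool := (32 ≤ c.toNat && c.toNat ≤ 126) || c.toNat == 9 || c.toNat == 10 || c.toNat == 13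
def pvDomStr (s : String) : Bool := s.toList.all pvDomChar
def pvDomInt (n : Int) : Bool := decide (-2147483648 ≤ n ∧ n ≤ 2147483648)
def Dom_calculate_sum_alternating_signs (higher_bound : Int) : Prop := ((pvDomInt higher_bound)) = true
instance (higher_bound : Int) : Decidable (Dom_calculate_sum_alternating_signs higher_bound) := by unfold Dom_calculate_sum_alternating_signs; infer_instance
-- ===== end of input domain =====

-- B replaces A's O(n) summation loop by the closed form of the alternating sum (O(1)).

-- ===== PORT A =====
def calculate_sum_alternating_signs (higher_bound : Int) : Int :=
  (PySem.List.pyRange 1 (higher_bound + 1) 1).foldl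
    (fun total_sum i => if PySem.Int.mod i 2 == 0 then total_sum - i else total_sum + i) 0

-- ===== PORT B =====
def calculate_sum_alternating_signs_alt (higher_bound : Int) : Int :=
  if higher_bound ≤ 0 then 0
  else if PySem.Int.mod higher_bound 2 == 0 then -(PySem.Int.floordiv higher_bound 2)
  else PySem.Int.floordiv (higher_bound + 1) 2

-- ===== PRECONDITION & SPEC =====
def Spec_calculate_sum_alternating_signs (higher_bound : Int) (out : Int) : Prop := out = calculate_sum_alternating_signs_alt higher_bound
instance (higher_bound : Int) (out : Int) : Decidable (Spec_calculate_sum_alternating_signs higher_bound out) := by unfold Spec_calculate_sum_alternating_signs; infer_instance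

-- ===== CLAIM (what is proved, stated in full; the proofs are below) =====
def Claim_equal_calculate_sum_alternating_signs : Prop := ∀ (higher_bound : Int), Dom_calculate_sum_alternating_signs higher_bound → Spec_calculate_sum_alternating_signs higher_bound (calculate_sum_alternating_signs higher_bound)

-- ===== LEMMAS AND PROOFS =====

-- closed form for A's loop on nonnegative bounds, by induction on the bound
theorem pv_loop_closed (n : Nat) :
    (PySem.List.pyRange 1 ((n : Int) + 1) 1).foldl
      (fun total_sum i => if PySem.Int.mod i 2 == 0 then total_sum - i else total_sum + i) 0
    = (if (n : Int) % 2 = 0 then -((n : Int) / 2) else ((n : Int) + 1) / 2) := by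
  induction n with
  | zero => simp [PySem.List.pyRange]
  | succ m ih =>
    have h : (1 : Int) ≤ (m : Int) + 1 := by omega
    have hr := PySem.List.pyRange_one_succ_right h
    push_cast
    rw [show (m : Int) + 1 + 1 = ((m : Int) + 1) + 1 by ring, hr, List.foldl_append]
    simp only [List.foldl_cons, List.foldl_nil]
    rw [ih]
    rw [PySem.Int.mod_eq_emod_of_pos (by omega : (0:Int) < 2)]
    simp only [beq_iff_eq]
    split_ifs <;> omega

theorem calculate_sum_alternating_signs_spec : Claim_equal_calculate_sum_alternating_signs := by
  intro hb _
  unfold Spec_calculate_sum_alternating_signs calculate_sum_alternating_signs calculate_sum_alternating_signs_alt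
  by_cases hle : hb ≤ 0
  · have h0 : (hb + 1 - 1).toNat = 0 := by omega
    rw [if_pos hle, PySem.List.pyRange_one, h0]
    simp
  · have hpos : 0 < hb := by omega
    have hn : hb = ((hb.toNat : Int)) := by omega
    rw [hn, pv_loop_closed hb.toNat]
    rw [PySem.Int.mod_eq_emod_of_pos (by omega : (0:Int) < 2),
        PySem.Int.floordiv_eq_ediv_of_pos (by omega : (0:Int) < 2),
        PySem.Int.floordiv_eq_ediv_of_pos (by omega : (0:Int) < 2)]
    have h0 : ¬ ((hb.toNat : Int) ≤ 0) := by omega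
    rw [if_neg h0]
    simp only [beq_iff_eq]
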